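-- pv_equiv track=rewrite | github.com/simonwmatthews/pyDEW | DEW_tools.py | d0_solid_solution
-- ===== SOURCE A (Python) =====
-- def d0_solid_solution(ss,s=''):
--     ss_name = ss[0]
--     ss_endmembers = ss[1]
--     s += ss_name + (24-len(ss_name))*' '+str(len(ss_endmembers))+'    0\n'
--     for i in range(len(ss_endmembers)):
--         if i%2 == 0:
--             s += '       1.000 ' + ss_endmembers[i] + (22-len(ss_endmembers[i]))*' '
--         else:
--             s += '1.000 ' + ss_endmembers[i] + '\n'
--     if len(ss_endmembers)%2 == 1:
--         s += '\n'
--     s += '\n'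
--     s += '    0.0000    0.0000    0.0000    0.0000    0.0000    0.0000\n'*2
--     s += '+----------------------------------------------------------------------\n'
--     return s
-- ===== SOURCE B (Python) =====
-- def d0_solid_solution(ss, s=''):
--     name, ems = ss
--     def pad(w, t):
--         return t + ' ' * (w - len(t))
--     parts = [s, pad(24, name), str(len(ems)), '    0\n']
--     i = 0
--     while i + 2 <= len(ems):
--         parts.append('       1.000 ' + pad(22, ems[i]) + '1.000 ' + ems[i + 1] + '\n')
--         i += 2
--     if i < len(ems):
--         parts.append('       1.000 ' + pad(22, ems[i]) + '\n')
--     parts.append('\n'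
--                  '    0.0000    0.0000    0.0000    0.0000    0.0000    0.0000\n'
--                  '    0.0000    0.0000    0.0000    0.0000    0.0000    0.0000\n'
--                  '+----------------------------------------------------------------------\n')
--     return ''.join(parts)
-- ===== Notes on version B (the rewrite author's own statement) =====
-- stated objective: alternative
-- what changed: B pairs the endmembers two at a time and emits each full output line as a unit, replacing A's per-element loop with an i%2 parity branch and the separate odd-count newline fixup.
import Mathlib
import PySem

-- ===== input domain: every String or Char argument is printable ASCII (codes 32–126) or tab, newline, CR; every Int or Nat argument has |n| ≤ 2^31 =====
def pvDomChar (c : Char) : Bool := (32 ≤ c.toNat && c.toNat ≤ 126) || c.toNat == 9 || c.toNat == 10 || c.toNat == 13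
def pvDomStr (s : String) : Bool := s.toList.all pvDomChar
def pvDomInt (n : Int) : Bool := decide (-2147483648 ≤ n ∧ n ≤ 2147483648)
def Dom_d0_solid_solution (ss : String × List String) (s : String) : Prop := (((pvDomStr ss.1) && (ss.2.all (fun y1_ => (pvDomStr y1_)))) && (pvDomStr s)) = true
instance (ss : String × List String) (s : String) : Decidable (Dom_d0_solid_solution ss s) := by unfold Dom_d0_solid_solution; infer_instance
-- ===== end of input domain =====

-- B builds each output line as a unit, pairing the endmembers two at a time, instead of
-- A's per-element loop with an i%2 branch and a separate odd-count fixup (objective: alternative decomposition).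

-- shared string constants (the fixed trailer lines of the block)
def pvZerosLine : List Char := "    0.0000    0.0000    0.0000    0.0000    0.0000    0.0000\n".toList
def pvPlusLine : List Char := "+----------------------------------------------------------------------\n".toList

-- ===== PORT A =====
def d0_solid_solution (ss : String × List String) (s : String) : String :=
  let ss_name := ss.1.toList
  let ems := ss.2.map String.toList
  let s1 := s.toList ++ ss_name ++ List.replicate (24 - (ss_name.length : Int)).toNat ' '
              ++ PySem.Int.toChars (PySem.List.len ems) ++ "    0\n".toList
  let s2 := (PySem.List.pyRange 0 (PySem.List.len ems) 1).foldl (fun acc i =>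
      if PySem.Int.mod i 2 == 0 then
        acc ++ "       1.000 ".toList ++ PySem.List.pyGetD ems i []
            ++ List.replicate (22 - ((PySem.List.pyGetD ems i []).length : Int)).toNat ' '
      else
        acc ++ "1.000 ".toList ++ PySem.List.pyGetD ems i [] ++ ['\n']) s1
  let s3 := if PySem.Int.mod (PySem.List.len ems) 2 == 1 then s2 ++ ['\n'] else s2
  String.mk (s3 ++ ['\n'] ++ PySem.List.pyRepeat pvZerosLine 2 ++ pvPlusLine)

-- ===== PORT B =====
-- pad t on the right with spaces to width w (empty padding if t is already wider)
def pvPadB (w : Int) (t : List Char) : List Char :=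
  t ++ List.replicate (w - (t.length : Int)).toNat ' '

-- B's two-at-a-time loop over the endmembers, one full line per step
def pvBodyB : List (List Char) → List Char
  | [] => []
  | [a] => "       1.000 ".toList ++ pvPadB 22 a ++ ['\n']
  | a :: b :: rest =>
      "       1.000 ".toList ++ pvPadB 22 a ++ "1.000 ".toList ++ b ++ ['\n'] ++ pvBodyB rest

def d0_solid_solution_alt (ss : String × List String) (s : String) : String :=
  let ems := ss.2.map String.toList
  String.mk (s.toList ++ pvPadB 24 ss.1.toList ++ PySem.Int.toChars (PySem.List.len ems)
    ++ "    0\n".toList ++ pvBodyB ems ++ ['\n'] ++ pvZerosLine ++ pvZerosLine ++ pvPlusLine)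

-- ===== PRECONDITION & SPEC =====
def Spec_d0_solid_solution (ss : String × List String) (s : String) (out : String) : Prop := out = d0_solid_solution_alt ss s
instance (ss : String × List String) (s : String) (out : String) : Decidable (Spec_d0_solid_solution ss s out) := by unfold Spec_d0_solid_solution; infer_instance

-- ===== CLAIM (what is proved, stated in full; the proofs are below) =====
def Claim_equal_d0_solid_solution : Prop := ∀ (ss : String × List String) (s : String), Dom_d0_solid_solution ss s → Spec_d0_solid_solution ss s (d0_solid_solution ss s)

-- ===== LEMMAS AND PROOFS =====

-- the body of A's loop, as a function of (index, element)
def pvStepA (acc : List Char) (p : Int × List Char) : List Char :=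
  if PySem.Int.mod p.1 2 == 0 then
    acc ++ "       1.000 ".toList ++ p.2 ++ List.replicate (22 - (p.2.length : Int)).toNat ' '
  else
    acc ++ "1.000 ".toList ++ p.2 ++ ['\n']

-- what A's loop appends, grouped two elements at a time
def pvChunks : List (List Char) → List Char
  | [] => []
  | [a] => "       1.000 ".toList ++ a ++ List.replicate (22 - (a.length : Int)).toNat ' '
  | a :: b :: r =>
      "       1.000 ".toList ++ a ++ List.replicate (22 - (a.length : Int)).toNat ' '
        ++ "1.000 ".toList ++ b ++ ['\n'] ++ pvChunks r

theorem pv_enumFold : ∀ (ems : List (List Char)) (k : Nat) (acc : List Char),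
    (PySem.List.enumerate ems (2 * (k : Int))).foldl pvStepA acc = acc ++ pvChunks ems
  | [], k, acc => by simp [PySem.List.enumerate_nil, pvChunks]
  | [a], k, acc => by
      simp [PySem.List.enumerate_cons, PySem.List.enumerate_nil, pvChunks, pvStepA,
        PySem.Int.mod, List.append_assoc]
  | a :: b :: r, k, acc => by
      have ih := pv_enumFold r (k + 1) (pvStepA (pvStepA acc (2 * (k : Int), a)) (2 * (k : Int) + 1, b))
      rw [PySem.List.enumerate_cons, PySem.List.enumerate_cons]
      have h2 : (2 : Int) * (k : Int) + 1 + 1 = 2 * ((k : Nat) + 1 : Nat) := by push_cast; ring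
      simp only [List.foldl_cons, h2] at *
      rw [ih]
      simp [pvStepA, PySem.Int.mod, pvChunks, List.append_assoc]

theorem pv_bodyB_eq (ems : List (List Char)) :
    (if PySem.Int.mod ((ems.length : Int)) 2 == 1 then pvChunks ems ++ ['\n'] else pvChunks ems)
      = pvBodyB ems := by
  induction ems using pvChunks.induct with
  | case1 => simp [pvChunks, pvBodyB, PySem.Int.mod]
  | case2 a => simp [pvChunks, pvBodyB, pvPadB, PySem.Int.mod, List.append_assoc]
  | case3 a b r ih =>
      have hlen : ((a :: b :: r).length : Int) = (r.length : Int) + 2 := by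
        push_cast [List.length_cons]; ring
      have hmod : PySem.Int.mod (((a :: b :: r).length : Int)) 2 = PySem.Int.mod ((r.length : Int)) 2 := by
        rw [hlen]; simp [PySem.Int.mod]
      rw [hmod]
      simp only [pvChunks, pvBodyB]
      rw [← ih]
      by_cases h : (PySem.Int.mod ((r.length : Int)) 2 == 1) = true
      · rw [if_pos h, if_pos h]
        simp [pvPadB, List.append_assoc]
      · rw [if_neg h, if_neg h]
        simp [pvPadB, List.append_assoc]


theorem pv_loopA (ems : List (List Char)) (init : List Char) :
    (PySem.List.pyRange 0 (PySem.List.len ems) 1).foldl (fun acc i =>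
      if PySem.Int.mod i 2 == 0 then
        acc ++ "       1.000 ".toList ++ PySem.List.pyGetD ems i []
            ++ List.replicate (22 - ((PySem.List.pyGetD ems i []).length : Int)).toNat ' '
      else
        acc ++ "1.000 ".toList ++ PySem.List.pyGetD ems i [] ++ ['\n']) init
    = init ++ pvChunks ems := by
  have h := PySem.List.enumerate_eq_map_pyRange (xs := ems) (d := ([] : List Char))
  have h0 := pv_enumFold ems 0 init
  simp only [Nat.cast_zero, mul_zero] at h0
  rw [← h0, h, List.foldl_map]
  rfl

-- ===== VERDICT (by name: the statement is the Claim_ definition above) =====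
theorem d0_solid_solution_spec : Claim_equal_d0_solid_solution := by
  intro ss s _
  unfold Spec_d0_solid_solution d0_solid_solution d0_solid_solution_alt
  simp only [pv_loopA]
  have hrep : PySem.List.pyRepeat pvZerosLine 2 = pvZerosLine ++ pvZerosLine := by decide
  rw [hrep]
  have hb := pv_bodyB_eq (ss.2.map String.toList)
  simp only [PySem.List.len_eq] at *
  split
  · rename_i hodd
    rw [if_pos (by simpa using hodd)] at hb
    rw [← hb]
    simp [pvPadB, List.append_assoc]
  · rename_i heven
    rw [if_neg (by simpa using heven)] at hb
    rw [← hb]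
    simp [pvPadB, List.append_assoc]
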